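-- pv_equiv track=rewrite | github.com/daniel-reich/turbo-robot | wqBnr3CDYByA5GLxo_19.py | unravel
-- ===== SOURCE A (Python) =====
-- def unravel(txt):
--   chunks, combos = [], []
--   while txt:
--     if txt[0]=='[':
--       chunks.append(txt[1:txt.index(']')].split('|'))
--       txt = txt[txt.index(']')+1:]
--     else:
--       chunks.append(txt[0])
--       txt = txt[1:]
--   x = separate(chunks)
--   return sorted(''.join(x[i:len(chunks)+i]) for i in range(0, len(x), len(chunks)))
--
-- def separate(lst):
--     sep = []
--     for i in range(len(lst)):
--         if type(lst[i])!=list: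
--             continue
--         else:
--             for j in range(len(lst[i])):
--                 sep.append(lst[:i]+[lst[i][j]]+lst[i+1:])
--             break
--     if sep:
--         combos = []
--         for i in sep:
--             combos.extend(separate(i))
--         return combos
--     else:
--         return lst
-- ===== SOURCE B (Python) =====
-- def unravel(txt):
--     chunks = []
--     while txt:
--         if txt[0] == '[':
--             end = txt.index(']')
--             chunks.append(txt[1:end].split('|'))
--             txt = txt[end + 1:]
--         else:
--             chunks.append([txt[0]])
--             txt = txt[1:]
--     combos = ['']
--     for opts in chunks:
--         combos = [prefix + opt for prefix in combos for opt in opts]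
--     return sorted(combos)
-- ===== Notes on version B (the rewrite author's own statement) =====
-- stated objective: simpler
-- what changed: B keeps the parsing loop but replaces A's recursive one-bracket-at-a-time `separate` expansion (which builds whole chunk lists, flattens them into one long list and then regroups it by strided slicing with range/join) with a direct Cartesian-product expansion over the parsed option groups, sorting the product directly.
import Mathlib
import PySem

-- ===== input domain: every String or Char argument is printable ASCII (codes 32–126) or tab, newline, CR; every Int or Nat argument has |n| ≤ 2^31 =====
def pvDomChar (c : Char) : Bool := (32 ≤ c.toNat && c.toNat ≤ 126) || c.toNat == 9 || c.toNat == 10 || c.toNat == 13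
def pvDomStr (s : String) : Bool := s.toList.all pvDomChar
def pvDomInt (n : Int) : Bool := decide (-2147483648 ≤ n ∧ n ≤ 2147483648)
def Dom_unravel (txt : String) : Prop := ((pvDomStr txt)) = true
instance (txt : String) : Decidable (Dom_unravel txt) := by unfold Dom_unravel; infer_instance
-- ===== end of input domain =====

-- B replaces A's recursive `separate` (which expands one bracket at a time into whole
-- chunk lists and regroups a flat result by strided slicing) with a direct Cartesian-product
-- expansion over the parsed option groups; objective: simpler.

-- ===== PORT A =====

-- A's chunk list mixes plain strings and option lists (Python's heterogeneous list).
inductive Chunk where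
  | str : List Char → Chunk
  | opts : List (List Char) → Chunk
deriving DecidableEq, Repr

def chunkIsOpts : Chunk → Bool
  | .str _ => false
  | .opts _ => true

def countOpts (l : List Chunk) : Nat := l.countP chunkIsOpts

-- the while-loop of A building `chunks`
def parseA : List Char → List Chunk
  | [] => []
  | c :: rest =>
    if c = '[' then
      match PySem.List.index? (c :: rest) ']' with      -- txt.index(']')
      | none => []                                       -- Python raises ValueError here (excluded by Pre_)
      | some i =>
        Chunk.opts (PySem.Chars.splitOn (PySem.List.slice (c :: rest) (some 1) (some (i : Int))) ['|'])
          :: parseA (PySem.List.slice (c :: rest) (some ((i : Int) + 1)) none)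
    else Chunk.str [c] :: parseA rest
termination_by l => l.length
decreasing_by
  all_goals first
    | (rw [PySem.List.slice_from _ (by omega), List.length_drop]; simp only [List.length_cons]; omega)
    | simp

-- the first `for i` loop of `separate`: scan for the first list element
def findSplit (acc : List Chunk) : List Chunk → Option (List Chunk × List (List Char) × List Chunk)
  | [] => none
  | .str s :: t => findSplit (acc ++ [.str s]) t
  | .opts l :: t => some (acc, l, t)

theorem findSplit_some_spec (l : List Chunk) : ∀ (acc pre post : List Chunk) (os : List (List Char)),
    findSplit acc l = some (pre, os, post) →
    ∃ mid : List (List Char), pre = acc ++ mid.map Chunk.str ∧ l = mid.map Chunk.str ++ Chunk.opts os :: post := by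
  induction l with
  | nil => intro acc pre post os h; simp [findSplit] at h
  | cons x t ih =>
    intro acc pre post os h
    cases x with
    | str s =>
      obtain ⟨mid, h1, h2⟩ := ih _ _ _ _ h
      exact ⟨s :: mid, by simp [h1], by simp [h2]⟩
    | opts ol =>
      simp [findSplit] at h
      obtain ⟨h1, h2, h3⟩ := h
      exact ⟨[], by simp [h1.symm], by simp [h2, h3]⟩

-- Python's recursive `separate`
def separate (lst : List Chunk) : List Chunk :=
  match h : findSplit [] lst with
  | none => lst                                          -- sep == []: return lst
  | some (pre, os, post) =>
    if hos : os = [] then lst                            -- sep == [] (first list empty): return lst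
    else (os.attach.map (fun c => separate (pre ++ Chunk.str c.1 :: post))).flatten
termination_by countOpts lst
decreasing_by
  obtain ⟨mid, h1, h2⟩ := findSplit_some_spec _ _ _ _ _ h
  subst h1 h2
  simp [countOpts, List.countP_append, chunkIsOpts]

def chunkStr : Chunk → List Char
  | .str s => s
  | .opts _ => []   -- unreachable in A (Python's ''.join would raise on a list)

def unravel (txt : String) : List String :=
  let chunks := parseA txt.toList
  let x := separate chunks
  PySem.List.sorted
    ((PySem.List.pyRange 0 (x.length : Int) (chunks.length : Int)).map
      (fun i => String.ofList (PySem.Chars.join []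
        ((PySem.List.slice x (some i) (some ((chunks.length : Int) + i))).map chunkStr))))
    (fun s => s) false

-- ===== PORT B =====

-- B's while-loop building option groups (a literal char becomes a one-option group)
def parseB : List Char → List (List (List Char))
  | [] => []
  | c :: rest =>
    if c = '[' then
      match PySem.List.index? (c :: rest) ']' with      -- txt.index(']')
      | none => []                                       -- Python raises ValueError here (excluded by Pre_)
      | some i =>
        PySem.Chars.splitOn (PySem.List.slice (c :: rest) (some 1) (some (i : Int))) ['|']
          :: parseB (PySem.List.slice (c :: rest) (some ((i : Int) + 1)) none)
    else [[c]] :: parseB rest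
termination_by l => l.length
decreasing_by
  all_goals first
    | (rw [PySem.List.slice_from _ (by omega), List.length_drop]; simp only [List.length_cons]; omega)
    | simp

-- B's `combos` loop: iterative Cartesian product of the groups
def expandAlt (chunks : List (List (List Char))) : List (List Char) :=
  chunks.foldl (fun combos opts => combos.flatMap (fun p => opts.map (fun o => p ++ o))) [[]]

def unravel_alt (txt : String) : List String :=
  PySem.List.sorted ((expandAlt (parseB txt.toList)).map (fun cs => String.ofList cs)) (fun s => s) false

-- ===== PRECONDITION & SPEC =====

-- Pre_ excludes exactly the inputs where Python A raises: the empty string (range step 0,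
-- ValueError) and any input with a '[' not followed by a later ']' (txt.index(']'), ValueError).
def Pre_unravel (txt : String) : Prop :=
  txt.toList ≠ [] ∧ ∀ i < txt.toList.length, txt.toList.getD i ' ' = '[' → ']' ∈ txt.toList.drop (i + 1)

instance (txt : String) : Decidable (Pre_unravel txt) := by unfold Pre_unravel; infer_instance

def pvWitness_unravel : String := "ab[c|d]"

def Spec_unravel (txt : String) (out : List String) : Prop := out = unravel_alt txt
instance (txt : String) (out : List String) : Decidable (Spec_unravel txt out) := by unfold Spec_unravel; infer_instance

-- ===== CLAIM (what is proved, stated in full; the proofs are below) =====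
def Claim_equal_unravel : Prop := ∀ (txt : String), Dom_unravel txt → Pre_unravel txt → Spec_unravel txt (unravel txt)

-- ===== LEMMAS AND PROOFS =====

-- the abstract Cartesian product keeping the tuple structure
def combosT : List (List (List Char)) → List (List (List Char))
  | [] => [[]]
  | o :: t => o.flatMap (fun c => (combosT t).map (fun r => c :: r))

-- A's chunk list viewed as option groups
def toOpts : List Chunk → List (List (List Char))
  | [] => []
  | .str s :: t => [s] :: toOpts t
  | .opts l :: t => l :: toOpts t

theorem join_empty_sep (parts : List (List Char)) : PySem.Chars.join [] parts = parts.flatten := by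
  induction parts with
  | nil => simp [PySem.Chars.join_nil]
  | cons p rest ih =>
    cases rest with
    | nil => simp [PySem.Chars.join_singleton]
    | cons q r => rw [PySem.Chars.join_cons_cons]; simp_all

theorem splitOn_go_ne_nil (sep : List Char) : ∀ (fuel : Nat) (l cur : List Char) (acc : List (List Char)),
    PySem.Chars.splitOn.go sep fuel l cur acc ≠ [] := by
  intro fuel
  induction fuel with
  | zero => intro l cur acc; simp [PySem.Chars.splitOn.go]
  | succ n ih =>
    intro l cur acc
    cases l with
    | nil => simp [PySem.Chars.splitOn.go]
    | cons c rest =>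
      rw [PySem.Chars.splitOn.go]
      split
      · exact ih _ _ _
      · exact ih _ _ _

theorem splitOn_ne_nil (s sep : List Char) : PySem.Chars.splitOn s sep ≠ [] :=
  splitOn_go_ne_nil sep _ s [] []

theorem parseB_eq_toOpts_parseA (l : List Char) : parseB l = toOpts (parseA l) := by
  fun_induction parseB l with
  | case1 => simp [parseA, toOpts]
  | case2 rest hnone =>
    rw [parseA, if_pos rfl, hnone]
    simp [toOpts]
  | case3 rest i hsome ih =>
    rw [parseA, if_pos rfl, hsome]
    simp [toOpts, ih]
  | case4 c rest hc ih =>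
    rw [parseA, if_neg hc]
    simp [toOpts, ih]

theorem findSplit_none_spec (l : List Chunk) : ∀ acc, findSplit acc l = none →
    ∃ mid : List (List Char), l = mid.map Chunk.str := by
  induction l with
  | nil => exact fun _ _ => ⟨[], rfl⟩
  | cons x t ih =>
    intro acc h
    cases x with
    | str s =>
      obtain ⟨mid, hmid⟩ := ih _ h
      exact ⟨s :: mid, by simp [hmid]⟩
    | opts ol => simp [findSplit] at h

theorem combosT_singletons_append (mid : List (List Char)) (ys : List (List (List Char))) :
    combosT (mid.map (fun s => [s]) ++ ys) = (combosT ys).map (fun r => mid ++ r) := by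
  induction mid with
  | nil => simp [combosT]
  | cons s t ih => simp [combosT, ih, List.map_map, Function.comp_def]

theorem combosT_singletons (mid : List (List Char)) :
    combosT (mid.map (fun s => [s])) = [mid] := by
  have := combosT_singletons_append mid []
  simpa [combosT] using this

theorem length_mem_combosT (os : List (List (List Char))) :
    ∀ co ∈ combosT os, co.length = os.length := by
  induction os with
  | nil => simp [combosT]
  | cons o t ih =>
    intro co hco
    simp only [combosT, List.mem_flatMap, List.mem_map] at hco
    obtain ⟨c, _, r, hr, rfl⟩ := hco
    simp [ih r hr]

theorem foldl_expand (chunks : List (List (List Char))) :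
    ∀ acc : List (List Char),
    chunks.foldl (fun combos opts => combos.flatMap (fun p => opts.map (fun o => p ++ o))) acc
      = acc.flatMap (fun p => (combosT chunks).map (fun co => p ++ co.flatten)) := by
  induction chunks with
  | nil => intro acc; simp [combosT]
  | cons o t ih =>
    intro acc
    rw [List.foldl_cons, ih]
    simp [combosT, List.flatMap_def, List.map_map, Function.comp_def, List.map_flatten,
      List.flatten_flatten, List.append_assoc]

theorem expandAlt_eq (os : List (List (List Char))) :
    expandAlt os = (combosT os).map List.flatten := by
  rw [expandAlt, foldl_expand]
  simp

theorem toOpts_append (a b : List Chunk) : toOpts (a ++ b) = toOpts a ++ toOpts b := by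
  induction a with
  | nil => simp [toOpts]
  | cons x t ih => cases x <;> simp [toOpts, ih]

theorem toOpts_map_str (mid : List (List Char)) :
    toOpts (mid.map Chunk.str) = mid.map (fun s => [s]) := by
  induction mid with
  | nil => simp [toOpts]
  | cons s t ih => simp [toOpts, ih]

theorem toOpts_length (l : List Chunk) : (toOpts l).length = l.length := by
  induction l with
  | nil => simp [toOpts]
  | cons x t ih => cases x <;> simp [toOpts, ih]

theorem sep_step (mid : List (List Char)) (os : List (List Char)) (post : List Chunk) :
    (os.map (fun c => ((combosT (toOpts (mid.map Chunk.str ++ Chunk.str c :: post))).map (fun co => co.map Chunk.str)).flatten)).flatten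
    = ((combosT (toOpts (mid.map Chunk.str ++ Chunk.opts os :: post))).map (fun co => co.map Chunk.str)).flatten := by
  simp only [toOpts_append, toOpts_map_str, toOpts, combosT_singletons_append, combosT]
  simp only [List.flatMap_def, List.map_map, Function.comp_def]
  simp [List.map_flatten, List.flatten_flatten, List.map_map, Function.comp_def]

-- the heart of the A side: `separate` computes the flattened Cartesian product,
-- provided no empty option group occurs (parseA never produces one)
theorem separate_eq (lst : List Chunk)
    (hne : ∀ os, Chunk.opts os ∈ lst → os ≠ []) :
    separate lst = ((combosT (toOpts lst)).map (fun co => co.map Chunk.str)).flatten := by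
  fun_induction separate lst with
  | case1 lst h =>
    obtain ⟨mid, rfl⟩ := findSplit_none_spec lst [] h
    simp [toOpts_map_str, combosT_singletons]
  | case2 lst pre post h =>
    obtain ⟨mid, hpre, hlst⟩ := findSplit_some_spec _ _ _ _ _ h
    exact absurd rfl (hne [] (by rw [hlst]; simp))
  | case3 lst pre os post h hos ih =>
    obtain ⟨mid, hpre, hlst⟩ := findSplit_some_spec _ _ _ _ _ h
    simp only [List.nil_append] at hpre
    subst hpre
    subst hlst
    have ihe : ∀ (c : List Char), c ∈ os → separate (mid.map Chunk.str ++ Chunk.str c :: post)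
        = ((combosT (toOpts (mid.map Chunk.str ++ Chunk.str c :: post))).map (fun co => co.map Chunk.str)).flatten := by
      intro c hc
      apply ih ⟨c, hc⟩
      intro os' hos'
      apply hne os'
      simp only [List.mem_append, List.mem_cons] at hos' ⊢
      rcases hos' with h' | h' | h'
      · exact Or.inl h'
      · exact absurd h' (by simp)
      · exact Or.inr (Or.inr h')
    simp only [List.map_subtype, List.unattach_attach]
    rw [List.map_congr_left (fun c hc => ihe c hc)]
    exact sep_step mid os post

-- regrouping a flat list of equal-length blocks by strided slicing recovers the blocks
theorem unflatten (n : Nat) (blocks : List (List Chunk))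
    (hb : ∀ b ∈ blocks, b.length = n) :
    (List.range blocks.length).map (fun k => ((blocks.flatten).drop (n * k)).take n) = blocks := by
  induction blocks with
  | nil => simp
  | cons b t ih =>
    have hbn : b.length = n := hb b (by simp)
    rw [List.length_cons, List.range_succ_eq_map, List.map_cons, List.map_map]
    congr 1
    · rw [Nat.mul_zero, List.drop_zero, List.flatten_cons, ← hbn, List.take_left]
    · refine (List.map_congr_left ?_).trans (ih (fun x hx => hb x (by simp [hx])))
      intro k _
      simp only [Function.comp_apply, List.flatten_cons]
      rw [Nat.mul_succ, List.drop_append, List.drop_eq_nil_of_le (by omega), List.nil_append, hbn]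
      congr 2
      omega

theorem regroup (n : Nat) (hn : 0 < n) (blocks : List (List Chunk))
    (hb : ∀ b ∈ blocks, b.length = n) :
    (PySem.List.pyRange 0 (blocks.flatten.length : Int) (n : Int)).map
      (fun i => PySem.List.slice blocks.flatten (some i) (some ((n : Int) + i)))
      = blocks := by
  have hlen : blocks.flatten.length = n * blocks.length := by
    induction blocks with
    | nil => simp
    | cons b t ih =>
      simp only [List.flatten_cons, List.length_append, hb b (by simp),
        ih (fun x hx => hb x (by simp [hx])), List.length_cons]
      ring
  rw [hlen, PySem.List.pyRange_of_pos _ _ (by exact_mod_cast hn)]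
  have hcount : (if (0 : Int) < ((n * blocks.length : Nat) : Int) then
      ((((n * blocks.length : Nat) : Int) - 0 + n - 1) / n).toNat else 0) = blocks.length := by
    by_cases hbl : blocks.length = 0
    · simp [hbl]
    · rw [if_pos (by push_cast; positivity)]
      have he : ((n * blocks.length : Nat) : Int) - 0 + n - 1 = (n - 1) + blocks.length * n := by
        push_cast; ring
      rw [he, Int.add_mul_ediv_right _ _ (by exact_mod_cast hn.ne')]
      have hz : ((n : Int) - 1) / n = 0 := Int.ediv_eq_zero_of_lt (by omega) (by omega)
      rw [hz]
      omega
  rw [hcount, List.map_map]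
  rw [List.map_congr_left (g := fun k => ((blocks.flatten).drop (n * k)).take n)
    (fun k _ => by
      simp only [Function.comp_apply]
      have h1 : ((0 : Int) + (n : Int) * (k : Int)) = ((n * k : Nat) : Int) := by push_cast; ring
      have h2 : ((n : Int) + ((n * k : Nat) : Int)) = ((n * k : Nat) : Int) + ((n : Nat) : Int) := by
        push_cast; ring
      rw [h1, h2, PySem.List.slice_natCast_add])]
  exact unflatten n blocks hb

theorem parseA_forall (l : List Char) :
    (parseA l).Forall (fun ch => ∀ os, ch = Chunk.opts os → os ≠ []) := by
  fun_induction parseA l with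
  | case1 => simp
  | case2 rest hnone => simp
  | case3 rest i hsome ih =>
    simp only [List.forall_cons]
    exact ⟨fun os h => by cases h; exact splitOn_ne_nil _ _, ih⟩
  | case4 c rest hc ih =>
    simp only [List.forall_cons]
    exact ⟨fun os h => Chunk.noConfusion h, ih⟩

theorem parseA_no_empty_opts (l : List Char) :
    ∀ os, Chunk.opts os ∈ parseA l → os ≠ [] := by
  intro os hos
  exact (List.forall_iff_forall_mem.mp (parseA_forall l) _ hos) os rfl

theorem parseA_ne_nil (l : List Char) (hl : l ≠ [])
    (hp : ∀ i < l.length, l.getD i ' ' = '[' → ']' ∈ l.drop (i + 1)) :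
    parseA l ≠ [] := by
  match l with
  | [] => exact absurd rfl hl
  | c :: rest =>
    rw [parseA]
    by_cases hc : c = '['
    · have hmem : ']' ∈ c :: rest := by
        have := hp 0 (by simp) (by simp [hc])
        simp at this
        simp [this]
      obtain ⟨k, hk⟩ := Option.isSome_iff_exists.mp ((PySem.List.index?_isSome_iff _ _).mpr hmem)
      rw [PySem.List.index?_eq_idxOf?] at hk
      simp [if_pos hc, hk]
    · simp [if_neg hc]

-- ===== VERDICT (by name: the statement is the Claim_ definition above) =====
theorem unravel_spec : Claim_equal_unravel := by
  intro txt _ hpre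
  obtain ⟨hne, hp⟩ := hpre
  unfold Spec_unravel unravel unravel_alt
  simp only
  set chunks := parseA txt.toList with hchunks
  have hsep := separate_eq chunks (parseA_no_empty_opts txt.toList)
  set blocks := (combosT (toOpts chunks)).map (fun co => co.map Chunk.str) with hblocks
  have hn : 0 < chunks.length := List.length_pos_iff.mpr (parseA_ne_nil _ hne hp)
  have hb : ∀ b ∈ blocks, b.length = chunks.length := by
    intro b hbmem
    rw [hblocks] at hbmem
    simp only [List.mem_map] at hbmem
    obtain ⟨co, hco, rfl⟩ := hbmem
    rw [List.length_map, length_mem_combosT _ co hco, toOpts_length]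
  rw [hsep]
  have hre := regroup chunks.length hn blocks hb
  have hx : (fun i => String.ofList (PySem.Chars.join []
        (List.map chunkStr (PySem.List.slice blocks.flatten (some i) (some ((chunks.length : Int) + i))))))
      = (fun l : List Chunk => String.ofList (PySem.Chars.join [] (List.map chunkStr l)))
        ∘ (fun i : Int => PySem.List.slice blocks.flatten (some i) (some ((chunks.length : Int) + i))) := rfl
  rw [hx, ← List.map_map, hre, hblocks, parseB_eq_toOpts_parseA, expandAlt_eq]
  simp [List.map_map, Function.comp_def, chunkStr, join_empty_sep, ← hchunks]
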